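-- pv_equiv track=rewrite | github.com/alexandraback/datacollection | solutions_5634697451274240_1/Python/yunmeow/q2.py | countF
-- ===== SOURCE A (Python) =====
-- def countF(line):
--   p = "+"
--   n = "-"
--   #list_of_line = enumerate(line)
--   first = line[0]
--   counter = 0
--   # count change
--   new_pos = 1
--   current_type = first
--   while new_pos != -1:
--     if current_type == p:
--       current_type = n
--     else:
--       current_type = p
--     new_pos = line.find(current_type, new_pos)
--     if new_pos!= -1:
--       counter = counter +1
--   if counter%2==1:
--     if first == "+":
--       counter = counter+1
--   if counter%2==0:
--     if first == "-":
--        counter = counter+1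
--   return counter
-- ===== SOURCE B (Python) =====
-- def countF(line):
--     first = line[0]
--     prev = '+' if first == '+' else '-'
--     counter = 0
--     for c in line[1:]:
--         if c == '+' or c == '-':
--             if c != prev:
--                 counter += 1
--                 prev = c
--     if counter % 2 == 1:
--         if first == '+':
--             counter += 1
--     if counter % 2 == 0:
--         if first == '-':
--             counter += 1
--     return counter
-- ===== Notes on version B (the rewrite author's own statement) =====
-- stated objective: simpler
-- what changed: A repeatedly calls line.find to hop between alternating '+'/'-' occurrences; B makes one direct left-to-right pass over the characters, counting sign switches against the previous sign, with the same final parity adjustment.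
import Mathlib
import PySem

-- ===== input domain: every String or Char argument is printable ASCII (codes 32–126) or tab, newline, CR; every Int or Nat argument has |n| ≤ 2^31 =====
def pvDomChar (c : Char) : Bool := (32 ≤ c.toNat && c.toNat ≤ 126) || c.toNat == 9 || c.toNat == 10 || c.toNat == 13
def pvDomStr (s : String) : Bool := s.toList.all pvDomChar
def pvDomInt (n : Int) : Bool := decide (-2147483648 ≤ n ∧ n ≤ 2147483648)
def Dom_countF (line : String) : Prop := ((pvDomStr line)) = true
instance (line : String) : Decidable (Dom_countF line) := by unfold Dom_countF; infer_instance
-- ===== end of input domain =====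

-- B replaces A's repeated `line.find` alternation scan by a single left-to-right pass that
-- counts switches between '+' and '-' (objective: simpler). Return-value equivalence only.

-- ===== PORT A =====
-- `line.find(c, pos)` is modelled by searching the suffix of the character list that starts at
-- `pos`: `findSuffixA c l` returns the suffix of `l` beginning at the first occurrence of `c`
-- (none = find returned -1).  The while-loop keeps that suffix instead of the integer index;
-- this is exact because the loop only ever uses `new_pos` as the start of the next find.
def findSuffixA (c : Char) : List Char → Option (List Char)
  | [] => none
  | x :: t => if x = c then some (x :: t) else findSuffixA c t

-- the while-loop of A; `fuel` is only a termination device (rest.length + 1 always suffices)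
def loopA (cur : Char) (rest : List Char) (counter : Int) : Nat → Int
  | 0 => counter
  | fuel + 1 =>
    let cur' := if cur = '+' then '-' else '+'
    match findSuffixA cur' rest with
    | none => counter
    | some s => loopA cur' s (counter + 1) fuel

def countF (line : String) : Int :=
  match line.toList with
  | [] => 0          -- Python raises IndexError at line[0]; excluded by Pre_countF
  | first :: rest =>
    let counter := loopA first rest 0 (rest.length + 1)
    let counter := if counter % 2 = 1 then (if first = '+' then counter + 1 else counter) else counter
    let counter := if counter % 2 = 0 then (if first = '-' then counter + 1 else counter) else counter
    counter

-- ===== PORT B =====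
def countF_alt (line : String) : Int :=
  match line.toList with
  | [] => 0          -- Python raises IndexError at line[0]; excluded by Pre_countF
  | first :: rest =>
    let prev := if first = '+' then '+' else '-'
    let st := rest.foldl
      (fun (st : Int × Char) c =>
        if c = '+' ∨ c = '-' then (if c ≠ st.2 then (st.1 + 1, c) else st) else st)
      (0, prev)
    let counter := st.1
    let counter := if counter % 2 = 1 then (if first = '+' then counter + 1 else counter) else counter
    let counter := if counter % 2 = 0 then (if first = '-' then counter + 1 else counter) else counter
    counter

-- ===== PRECONDITION & SPEC =====
-- Pre_ excludes only the empty string, on which both Pythons raise IndexError at line[0].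
def Pre_countF (line : String) : Prop := line ≠ ""
instance (line : String) : Decidable (Pre_countF line) := by unfold Pre_countF; infer_instance
def pvWitness_countF : String := "+-x+"

def Spec_countF (line : String) (out : Int) : Prop := out = countF_alt line
instance (line : String) (out : Int) : Decidable (Spec_countF line out) := by unfold Spec_countF; infer_instance

-- ===== CLAIM (what is proved, stated in full; the proofs are below) =====
def Claim_equal_countF : Prop := ∀ (line : String), Dom_countF line → Pre_countF line → Spec_countF line (countF line)

-- ===== LEMMAS AND PROOFS =====

-- the number of sign switches along l, starting from previous sign `prev`
def countTrans (prev : Char) : List Char → Int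
  | [] => 0
  | c :: t => if c = '+' ∨ c = '-' then
      (if c ≠ prev then 1 + countTrans c t else countTrans prev t)
    else countTrans prev t

theorem foldl_countTrans (l : List Char) (prev : Char) (k : Int) :
    (l.foldl
      (fun (st : Int × Char) c =>
        if c = '+' ∨ c = '-' then (if c ≠ st.2 then (st.1 + 1, c) else st) else st)
      (k, prev)).1 = k + countTrans prev l := by
  induction l generalizing prev k with
  | nil => simp [countTrans]
  | cons c t ih =>
    simp only [List.foldl_cons]
    split_ifs with h hc
    · rw [ih]
      have hct : countTrans prev (c :: t) = 1 + countTrans c t := by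
        simp_all [countTrans]
      rw [hct]; ring
    · rw [ih]
      have hct : countTrans prev (c :: t) = countTrans prev t := by
        simp_all [countTrans]
      rw [hct]
    · rw [ih]
      have hct : countTrans prev (c :: t) = countTrans prev t := by
        simp_all [countTrans]
      rw [hct]

theorem findSuffixA_none {c : Char} {l : List Char} (h : findSuffixA c l = none) : c ∉ l := by
  induction l with
  | nil => simp
  | cons x t ih =>
    by_cases hx : x = c
    · simp [findSuffixA, hx] at h
    · simp [findSuffixA, hx] at h
      simp [ih h, Ne.symm hx]

theorem findSuffixA_some {c : Char} {l s : List Char} (h : findSuffixA c l = some s) :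
    ∃ l₁ t, l = l₁ ++ c :: t ∧ c ∉ l₁ ∧ s = c :: t := by
  induction l generalizing s with
  | nil => simp [findSuffixA] at h
  | cons x t ih =>
    by_cases hx : x = c
    · refine ⟨[], t, by simp [hx], by simp, ?_⟩
      simp [findSuffixA, hx] at h
      simp [← h]
    · simp [findSuffixA, hx] at h
      obtain ⟨l₁, t', h1, h2, h3⟩ := ih h
      exact ⟨x :: l₁, t', by simp [h1], by simp [h2, Ne.symm hx], h3⟩

theorem countTrans_no_flip {cur : Char} (hcur : cur = '+' ∨ cur = '-') {l : List Char}
    (h : (if cur = '+' then '-' else '+') ∉ l) : countTrans cur l = 0 := by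
  induction l with
  | nil => rfl
  | cons x t ih =>
    rw [List.mem_cons, not_or] at h
    obtain ⟨hxne, ht⟩ := h
    have hx : x = cur ∨ ¬ (x = '+' ∨ x = '-') := by
      rcases hcur with hc | hc <;> subst hc <;> simp at hxne <;> tauto
    rcases hx with hx | hx
    · subst hx
      rcases hcur with hc | hc <;> subst hc <;> simpa [countTrans] using ih ht
    · simpa [countTrans, hx] using ih ht

theorem countTrans_append {cur : Char} (hcur : cur = '+' ∨ cur = '-') (l₁ t : List Char)
    (h : (if cur = '+' then '-' else '+') ∉ l₁) :
    countTrans cur (l₁ ++ (if cur = '+' then '-' else '+') :: t)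
      = 1 + countTrans (if cur = '+' then '-' else '+') t := by
  induction l₁ with
  | nil =>
    rcases hcur with hc | hc <;> subst hc <;> simp [countTrans]
  | cons x l₁ ih =>
    rw [List.mem_cons, not_or] at h
    obtain ⟨hxne, ht⟩ := h
    have hx : x = cur ∨ ¬ (x = '+' ∨ x = '-') := by
      rcases hcur with hc | hc <;> subst hc <;> simp at hxne <;> tauto
    rcases hx with hx | hx
    · subst hx
      rcases hcur with hc | hc <;> subst hc <;> simpa [countTrans] using ih ht
    · simpa [countTrans, hx] using ih ht

-- a leading character equal to the current sign is skipped by A's loop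
theorem loopA_cons {cur : Char} (hcur : cur = '+' ∨ cur = '-') (t : List Char) (k : Int)
    (fuel : Nat) : loopA cur (cur :: t) k fuel = loopA cur t k fuel := by
  cases fuel with
  | zero => rfl
  | succ fuel =>
    have hne : cur ≠ (if cur = '+' then '-' else '+') := by
      rcases hcur with hc | hc <;> simp [hc]
    simp [loopA, findSuffixA, hne]

-- loopA only reads `cur` through its flip
theorem loopA_congr {c₁ c₂ : Char}
    (h : (if c₁ = '+' then '-' else '+') = (if c₂ = '+' then '-' else '+'))
    (rest : List Char) (k : Int) (fuel : Nat) :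
    loopA c₁ rest k fuel = loopA c₂ rest k fuel := by
  cases fuel with
  | zero => rfl
  | succ fuel => simp only [loopA, h]

theorem loopA_eq_countTrans (n : Nat) :
    ∀ (rest : List Char), rest.length ≤ n → ∀ (cur : Char), (cur = '+' ∨ cur = '-') →
    ∀ (k : Int) (fuel : Nat), rest.length + 1 ≤ fuel →
    loopA cur rest k fuel = k + countTrans cur rest := by
  induction n with
  | zero =>
    intro rest hn cur hcur k fuel hfuel
    have : rest = [] := List.length_eq_zero_iff.mp (Nat.le_zero.mp hn)
    subst this
    cases fuel with
    | zero => omega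
    | succ fuel => simp [loopA, findSuffixA, countTrans]
  | succ n ih =>
    intro rest hn cur hcur k fuel hfuel
    cases fuel with
    | zero => omega
    | succ fuel =>
      set cur' : Char := if cur = '+' then '-' else '+' with hcur'
      have hcur'mem : cur' = '+' ∨ cur' = '-' := by
        rcases hcur with hc | hc <;> simp [hcur', hc]
      cases hfind : findSuffixA cur' rest with
      | none =>
        have h0 : countTrans cur rest = 0 :=
          countTrans_no_flip hcur (by rw [← hcur']; exact findSuffixA_none hfind)
        simp [loopA, ← hcur', hfind, h0]
      | some s =>
        obtain ⟨l₁, t, hsplit, hnotin, hs⟩ := findSuffixA_some hfind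
        have hlen : rest.length = l₁.length + 1 + t.length := by simp [hsplit]; omega
        have hrec : loopA cur rest k (fuel + 1) = loopA cur' t (k + 1) fuel := by
          rw [show loopA cur rest k (fuel + 1)
              = loopA cur' s (k + 1) fuel by simp [loopA, ← hcur', hfind]]
          rw [hs]
          exact loopA_cons hcur'mem t (k + 1) fuel
        rw [hrec, ih t (by omega) cur' hcur'mem (k + 1) fuel (by omega)]
        rw [hsplit]
        have hca := countTrans_append hcur l₁ t (by rw [← hcur']; exact hnotin)
        rw [← hcur'] at hca
        rw [hca]
        ring

-- ===== VERDICT (by name: the statement is the Claim_ definition above) =====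
theorem countF_spec : Claim_equal_countF := by
  intro line _ _
  unfold Spec_countF countF countF_alt
  cases hl : line.toList with
  | nil => rfl
  | cons first rest =>
    simp only []
    set prev : Char := if first = '+' then '+' else '-' with hprev
    have hprevmem : prev = '+' ∨ prev = '-' := by
      by_cases h : first = '+' <;> simp [hprev, h]
    have hflip : (if first = '+' then '-' else '+') = (if prev = '+' then '-' else '+') := by
      by_cases h : first = '+' <;> simp [hprev, h]
    have hloop : loopA first rest 0 (rest.length + 1) = countTrans prev rest := by
      rw [loopA_congr hflip,
        loopA_eq_countTrans rest.length rest le_rfl prev hprevmem 0 (rest.length + 1) le_rfl]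
      ring
    have hfold := foldl_countTrans rest prev 0
    rw [hloop]
    rw [show (0 : Int) + countTrans prev rest = countTrans prev rest by ring] at hfold
    rw [hfold]
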